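-- pv_equiv track=rewrite | github.com/devMingu/codeTest | 프로그래머스/대충만든 자판.py | count_key
-- ===== SOURCE A (Python) =====
-- def count_key(targets, keyboard):
--     result = []
--     for el in targets:
--         ans = 0
--         for item in el:
--            if item in keyboard:
--                ans += keyboard[item]
--            else:
--                ans = -1
--                break
--
--         result.append(ans)
--
--     return result
-- ===== SOURCE B (Python) =====
-- def count_key(targets, keyboard):
--     result = []
--     for el in targets:
--         freq = {}
--         for c in el:
--             freq[c] = freq.get(c, 0) + 1
--         if all(c in keyboard for c in freq):
--             result.append(sum(keyboard[c] * n for c, n in freq.items()))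
--         else:
--             result.append(-1)
--     return result
-- ===== Notes on version B (the rewrite author's own statement) =====
-- stated objective: alternative
-- what changed: B computes each string's cost via a character-frequency dictionary built in one counting pass, then a weighted sum keyboard[c]*count over the distinct characters (with a key-presence check over the dict's keys), instead of A's per-character accumulate-with-early-break loop.
import Mathlib
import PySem

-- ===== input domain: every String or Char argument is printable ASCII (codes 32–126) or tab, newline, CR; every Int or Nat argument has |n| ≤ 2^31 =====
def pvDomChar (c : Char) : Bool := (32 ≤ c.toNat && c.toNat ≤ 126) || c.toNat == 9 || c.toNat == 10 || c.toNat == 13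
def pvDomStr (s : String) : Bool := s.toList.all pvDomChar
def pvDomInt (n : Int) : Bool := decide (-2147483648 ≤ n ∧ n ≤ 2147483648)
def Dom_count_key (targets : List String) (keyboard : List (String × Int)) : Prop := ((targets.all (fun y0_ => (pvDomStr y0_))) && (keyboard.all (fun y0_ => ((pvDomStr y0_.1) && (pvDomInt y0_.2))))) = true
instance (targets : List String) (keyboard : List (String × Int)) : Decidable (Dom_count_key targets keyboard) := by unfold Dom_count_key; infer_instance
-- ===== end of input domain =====

-- B replaces A's per-character accumulate-and-break loop by a per-string character
-- frequency dictionary: cost = sum of keyboard[c] * count over the DISTINCT characters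
-- (alternative decomposition via a different data structure; same return values).

-- ===== PORT A =====
-- Python dict lookup on the association list: first match.
def kbGet? (keyboard : List (String × Int)) (k : String) : Option Int :=
  match keyboard with
  | [] => none
  | (a, v) :: rest => if a == k then some v else kbGet? rest k

-- A's inner loop: accumulate, set -1 and break on a missing character.
def aLoop (keyboard : List (String × Int)) : List Char → Int → Int
  | [], ans => ans
  | c :: rest, ans =>
    match kbGet? keyboard (String.ofList [c]) with
    | some v => aLoop keyboard rest (ans + v)
    | none => -1

def count_key (targets : List String) (keyboard : List (String × Int)) : List Int :=
  targets.foldl (fun result el => result ++ [aLoop keyboard el.toList 0]) []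

-- ===== PORT B =====
-- B's counting loop: freq[c] = freq.get(c, 0) + 1
def bFreq (cs : List Char) : PySem.Dict Char Int :=
  cs.foldl (fun d c => d.insert c (d.getD c 0 + 1)) PySem.Dict.empty

def count_key_alt (targets : List String) (keyboard : List (String × Int)) : List Int :=
  targets.foldl (fun result el =>
    let freq := bFreq el.toList
    if freq.keys.all (fun c => (kbGet? keyboard (String.ofList [c])).isSome) then
      result ++ [freq.items.foldl
        (fun s p => s + (kbGet? keyboard (String.ofList [p.1])).getD 0 * p.2) 0]
    else
      result ++ [-1]) []

-- ===== PRECONDITION & SPEC =====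
def Spec_count_key (targets : List String) (keyboard : List (String × Int)) (out : List Int) : Prop := out = count_key_alt targets keyboard
instance (targets : List String) (keyboard : List (String × Int)) (out : List Int) : Decidable (Spec_count_key targets keyboard out) := by unfold Spec_count_key; infer_instance

-- ===== CLAIM (what is proved, stated in full; the proofs are below) =====
def Claim_equal_count_key : Prop := ∀ (targets : List String) (keyboard : List (String × Int)), Dom_count_key targets keyboard → Spec_count_key targets keyboard (count_key targets keyboard)

-- ===== LEMMAS AND PROOFS =====

-- A's loop with accumulator a equals a + the plain sum, unless a key is missing.
theorem aLoop_eq (keyboard : List (String × Int)) (cs : List Char) (ans : Int) :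
    aLoop keyboard cs ans
      = if cs.all (fun c => (kbGet? keyboard (String.ofList [c])).isSome)
        then ans + (cs.map (fun c => (kbGet? keyboard (String.ofList [c])).getD 0)).sum
        else -1 := by
  induction cs generalizing ans with
  | nil => simp [aLoop]
  | cons c rest ih =>
    simp only [aLoop, List.all_cons, List.map_cons, List.sum_cons]
    cases h : kbGet? keyboard (String.ofList [c]) with
    | none => simp
    | some v =>
      simp only [Option.isSome_some, Bool.true_and, Option.getD_some]
      rw [ih]
      split_ifs with hall
      · ring_nf
      · rfl

-- picking out the single occurrence of c in a Nodup list
theorem sum_map_single (ks : List Char) (f : Char → Int) (c : Char)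
    (hnd : ks.Nodup) (hc : c ∈ ks) :
    (ks.map (fun k => if k = c then f k else 0)).sum = f c := by
  induction ks with
  | nil => cases hc
  | cons a ks ih =>
    rcases List.nodup_cons.mp hnd with ⟨hna, hnd'⟩
    simp only [List.map_cons, List.sum_cons]
    by_cases hac : a = c
    · subst hac
      have hz : (ks.map (fun k => if k = a then f k else 0)).sum = 0 := by
        apply List.sum_eq_zero
        intro x hx
        rcases List.mem_map.mp hx with ⟨y, hy, rfl⟩
        have hya : y ≠ a := fun h => hna (h ▸ hy)
        simp [hya]
      rw [if_pos rfl, hz]; ring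
    · have hc' : c ∈ ks := by
        rcases List.mem_cons.mp hc with h | h
        · exact absurd h.symm hac
        · exact h
      rw [if_neg hac, ih hnd' hc']; ring

-- the weighted sum over distinct keys equals the plain sum over all characters
theorem weighted_sum (cs : List Char) (ks : List Char) (f : Char → Int)
    (hnd : ks.Nodup) (hsub : ∀ c ∈ cs, c ∈ ks) :
    (ks.map (fun k => f k * (cs.count k : Int))).sum
      = (cs.map f).sum := by
  induction cs with
  | nil => simp
  | cons c rest ih =>
    have step : ∀ k, f k * (((c :: rest).count k : Nat) : Int)
        = f k * (rest.count k : Int) + (if k = c then f k else 0) := by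
      intro k
      rw [List.count_cons]
      by_cases h : k = c
      · subst h; simp; ring
      · simp [h]
        exact Or.inl (fun hh => h hh.symm)
    calc (ks.map (fun k => f k * ((c :: rest).count k : Int))).sum
        = (ks.map (fun k => f k * (rest.count k : Int) + (if k = c then f k else 0))).sum := by
          exact congrArg List.sum (List.map_congr_left (fun k _ => step k))
      _ = (ks.map (fun k => f k * (rest.count k : Int))).sum
            + (ks.map (fun k => if k = c then f k else 0)).sum := by
          rw [← List.sum_map_add]
      _ = (rest.map f).sum + f c := by
          rw [ih (fun x hx => hsub x (List.mem_cons_of_mem _ hx)),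
              sum_map_single ks f c hnd (hsub c List.mem_cons_self)]
      _ = ((c :: rest).map f).sum := by simp [List.map_cons, List.sum_cons]; ring

theorem bFreq_eq_counter (cs : List Char) : bFreq cs = PySem.Dict.counter cs :=
  PySem.Dict.foldl_insert_getD_add_one_eq_counter cs

-- per-element agreement of the two loops
theorem elem_eq (keyboard : List (String × Int)) (cs : List Char) :
    aLoop keyboard cs 0
      = (if (bFreq cs).keys.all (fun c => (kbGet? keyboard (String.ofList [c])).isSome) then
          (bFreq cs).items.foldl
            (fun s p => s + (kbGet? keyboard (String.ofList [p.1])).getD 0 * p.2) 0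
        else -1) := by
  rw [aLoop_eq, bFreq_eq_counter, PySem.Dict.keys_counter, PySem.Dict.items_counter]
  set f : Char → Int := fun c => (kbGet? keyboard (String.ofList [c])).getD 0 with hf
  have hall : ((PySem.Set.ofList cs : List Char).all
        (fun c => (kbGet? keyboard (String.ofList [c])).isSome))
      = cs.all (fun c => (kbGet? keyboard (String.ofList [c])).isSome) := by
    apply Bool.eq_iff_iff.mpr
    simp only [List.all_eq_true]
    constructor
    · intro h c hc; exact h c ((PySem.Set.mem_ofList cs c).mpr hc)
    · intro h c hc; exact h c ((PySem.Set.mem_ofList cs c).mp hc)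
  rw [hall]
  split_ifs with h
  · rw [PySem.List.foldl_add (g := fun p : Char × Int => f p.1 * p.2)]
    rw [List.map_map]
    have : ((PySem.Set.ofList cs : List Char).map
        ((fun p : Char × Int => f p.1 * p.2) ∘ fun k => (k, (cs.count k : Int)))).sum
        = (cs.map f).sum := by
      have := weighted_sum cs (PySem.Set.ofList cs) f (PySem.Set.nodup_ofList cs)
        (fun c hc => (PySem.Set.mem_ofList cs c).mpr hc)
      simpa [Function.comp] using this
    rw [this]
  · rfl

-- ===== VERDICT (by name: the statement is the Claim_ definition above) =====
theorem count_key_spec : Claim_equal_count_key := by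
  intro targets keyboard _
  unfold Spec_count_key count_key count_key_alt
  apply PySem.List.foldl_congr_mem
  intro acc el _
  show acc ++ [aLoop keyboard el.toList 0] = _
  rw [elem_eq keyboard el.toList]
  by_cases h : ((bFreq el.toList).keys.all
      (fun c => (kbGet? keyboard (String.ofList [c])).isSome)) = true
  · simp only [h, if_pos]
  · simp only [Bool.not_eq_true] at h
    simp [h]
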